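-- pv_equiv track=rewrite | github.com/sowiwia/IP-Algo1 | Guías/guia8.py | str_a_tokens
-- ===== SOURCE A (Python) =====
-- def str_a_tokens(s:str) -> list[str]:
--     res: list[str] = []
--     token: str = ""
--
--     for caracter in s:
--         if caracter != " ":
--             token += caracter
--         else:
--             res.append(token)
--             token = ""
--
--     if token != "":
--         res.append(token)
--
--     return res
-- ===== SOURCE B (Python) =====
-- def str_a_tokens(s: str) -> list[str]:
--     parts = s.split(" ")
--     if parts and parts[-1] == "":
--         parts.pop()
--     return parts
-- ===== Notes on version B (the rewrite author's own statement) =====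
-- stated objective: idiomatic
-- what changed: Replaces A's character-by-character loop maintaining a token buffer by str.split on the separator followed by dropping exactly one trailing empty token.
import Mathlib
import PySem

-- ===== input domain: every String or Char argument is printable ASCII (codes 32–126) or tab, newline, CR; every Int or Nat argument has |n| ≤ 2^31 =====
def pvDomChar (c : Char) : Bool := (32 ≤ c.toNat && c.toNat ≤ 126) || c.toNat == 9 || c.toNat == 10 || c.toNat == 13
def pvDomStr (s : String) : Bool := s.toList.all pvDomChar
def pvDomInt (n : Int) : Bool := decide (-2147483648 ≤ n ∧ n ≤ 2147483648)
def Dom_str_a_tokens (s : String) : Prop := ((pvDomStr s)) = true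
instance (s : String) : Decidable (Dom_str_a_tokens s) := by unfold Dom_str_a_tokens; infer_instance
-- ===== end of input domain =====

-- B tokenizes by splitting on " " and dropping one trailing empty token, instead of A's
-- character-by-character loop with a token buffer (objective: more idiomatic; same cost).


-- ===== PORT A =====
-- A's loop over the characters with state (res, token); token kept as List Char,
-- appended to via token ++ [c] exactly as Python's token += caracter.
def strAGo : List Char → List String → List Char → List String
  | [], res, token => if token ≠ [] then res ++ [String.ofList token] else res
  | c :: rest, res, token =>
      if c ≠ ' ' then strAGo rest res (token ++ [c])
      else strAGo rest (res ++ [String.ofList token]) []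

def str_a_tokens (s : String) : List String := strAGo s.toList [] []

-- ===== PORT B =====
-- parts = s.split(" "); if parts and parts[-1] == "": parts.pop(); return parts
def str_a_tokens_alt (s : String) : List String :=
  match PySem.Str.split? s " " with
  | none => []   -- unreachable: the separator " " is nonempty
  | some parts => if parts ≠ [] ∧ parts.getLast? = some "" then parts.dropLast else parts

-- ===== PRECONDITION & SPEC =====
def Spec_str_a_tokens (s : String) (out : List String) : Prop := out = str_a_tokens_alt s
instance (s : String) (out : List String) : Decidable (Spec_str_a_tokens s out) := by unfold Spec_str_a_tokens; infer_instance

-- ===== CLAIM (what is proved, stated in full; the proofs are below) =====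
def Claim_equal_str_a_tokens : Prop := ∀ (s : String), Dom_str_a_tokens s → Spec_str_a_tokens s (str_a_tokens s)

-- ===== LEMMAS AND PROOFS =====

-- the chunks of cs split on ' ', with empty pieces kept (what Python s.split(" ") yields)
def chunks : List Char → List (List Char)
  | [] => [[]]
  | c :: cs => if c = ' ' then [] :: chunks cs else (chunks cs).modifyHead (c :: ·)

-- drop one trailing empty string
def trimLast (ps : List String) : List String :=
  if ps.getLast? = some "" then ps.dropLast else ps

theorem chunks_ne_nil (cs : List Char) : chunks cs ≠ [] := by
  cases cs with
  | nil => simp [chunks]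
  | cons c cs =>
      simp only [chunks]
      split
      · simp
      · cases h : chunks cs with
        | nil => exact absurd h (chunks_ne_nil cs)
        | cons p ps => simp [h, List.modifyHead]

theorem trimLast_cons (x : String) (l : List String) (h : l ≠ []) :
    trimLast (x :: l) = x :: trimLast l := by
  unfold trimLast
  cases l with
  | nil => exact absurd rfl h
  | cons y ys => simp only [List.getLast?_cons_cons]; split <;> simp_all

-- head-prepend into the first chunk
def consHead (t : List Char) : List (List Char) → List (List Char)
  | [] => [t]
  | p :: ps => (t ++ p) :: ps

theorem strAGo_eq (cs : List Char) : ∀ (res : List String) (token : List Char),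
    strAGo cs res token = res ++ trimLast ((consHead token (chunks cs)).map String.ofList) := by
  induction cs with
  | nil =>
      intro res token
      simp only [strAGo, chunks, consHead, List.map]
      unfold trimLast
      by_cases h : token = []
      · subst h; simp
      · simp only [List.getLast?_singleton]
        have hne : String.ofList token ≠ "" := by
          intro he
          have := congrArg String.toList he
          simp at this
          exact h this
        simp [h, hne]
  | cons c rest ih =>
      intro res token
      by_cases hc : c = ' '
      · subst hc
        rw [show strAGo (' ' :: rest) res token
              = strAGo rest (res ++ [String.ofList token]) [] from by simp [strAGo]]
        rw [ih]
        cases h : chunks rest with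
        | nil => exact absurd h (chunks_ne_nil rest)
        | cons p ps =>
            have hcs : chunks (' ' :: rest) = [] :: p :: ps := by simp [chunks, h]
            rw [hcs]
            simp only [consHead, List.map, List.nil_append, List.append_nil]
            rw [show trimLast (String.ofList token :: String.ofList p :: List.map String.ofList ps)
                  = String.ofList token :: trimLast (String.ofList p :: List.map String.ofList ps) from
                trimLast_cons _ _ (by simp)]
            simp
      · rw [show strAGo (c :: rest) res token
              = strAGo rest res (token ++ [c]) from by simp [strAGo, hc]]
        rw [ih]
        simp only [chunks, if_neg hc]
        congr 2
        cases h : chunks rest with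
        | nil => exact absurd h (chunks_ne_nil rest)
        | cons p ps => simp [consHead, List.modifyHead, h]

theorem splitOn_go_space (fuel : Nat) : ∀ (l cur : List Char) (acc : List (List Char)),
    l.length < fuel →
    PySem.Chars.splitOn.go [' '] fuel l cur acc = acc.reverse ++ consHead cur.reverse (chunks l) := by
  induction fuel with
  | zero => intro l cur acc h; omega
  | succ fuel ih =>
      intro l cur acc h
      cases l with
      | nil =>
          simp [PySem.Chars.splitOn.go, chunks, consHead]
      | cons c rest =>
          simp only [PySem.Chars.splitOn.go]
          by_cases hc : c = ' '
          · subst hc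
            rw [if_pos (by simp [List.isPrefixOf])]
            rw [ih _ _ _ (by simpa using Nat.lt_of_succ_lt_succ h)]
            cases hch : chunks rest with
            | nil => exact absurd hch (chunks_ne_nil rest)
            | cons p ps => simp [chunks, consHead, hch]
          · rw [if_neg (by simp [List.isPrefixOf, Ne.symm hc])]
            rw [ih _ _ _ (by simpa using Nat.lt_of_succ_lt_succ h)]
            cases hch : chunks rest with
            | nil => exact absurd hch (chunks_ne_nil rest)
            | cons p ps => simp [chunks, consHead, hc, hch, List.modifyHead]

theorem splitOn_space (cs : List Char) : PySem.Chars.splitOn cs [' '] = chunks cs := by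
  unfold PySem.Chars.splitOn
  rw [splitOn_go_space (cs.length + 1) cs [] [] (by omega)]
  cases h : chunks cs with
  | nil => exact absurd h (chunks_ne_nil cs)
  | cons p ps => simp [consHead]

theorem alt_eq (s : String) :
    str_a_tokens_alt s = trimLast ((chunks s.toList).map String.ofList) := by
  unfold str_a_tokens_alt
  have : PySem.Str.split? s " " = some (((chunks s.toList).map String.ofList)) := by
    simp only [PySem.Str.split?, PySem.Chars.split?]
    rw [if_neg (by simp)]
    have : (" ".toList) = [' '] := rfl
    rw [this, splitOn_space]
    rfl
  rw [this]
  simp only [trimLast]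
  have hne : (chunks s.toList).map String.ofList ≠ [] := by
    simp [chunks_ne_nil s.toList]
  split
  · rename_i hif
    rw [if_pos hif.2]
  · rename_i hif
    rw [not_and_or] at hif
    rcases hif with h1 | h2
    · exact absurd hne (by simpa using h1)
    · rw [if_neg (by simpa using h2)]

-- ===== VERDICT (by name: the statement is the Claim_ definition above) =====
theorem str_a_tokens_spec : Claim_equal_str_a_tokens := by
  intro s _
  unfold Spec_str_a_tokens str_a_tokens
  rw [strAGo_eq, alt_eq]
  cases h : chunks s.toList with
  | nil => exact absurd h (chunks_ne_nil s.toList)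
  | cons p ps => simp [consHead]
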